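-- pv_equiv track=rewrite | github.com/Reifhel/TCC---Gerador-de-Grade-Horaria | testes.py | verificar_maior_espaco
-- ===== SOURCE A (Python) =====
-- def verificar_maior_espaco(grade: list, horarios_possiveis: list) -> list:
--     # Verificar maior espaço vago
--     maior_espaco = []
--     dia_escolhido = 0
--     for dia in range(5):
--         espaco_atual = []
--         espacos = []
--         for horario in horarios_possiveis:
--             if grade[horario][dia] is None:
--                 espaco_atual.append(horario)
--             else:
--                 if espaco_atual:
--                     espacos.append(espaco_atual)  # Adiciona o espaço atual à lista de espaços
--                     espaco_atual = []  # Reseta o espaço atual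
--         if espaco_atual:
--             espacos.append(espaco_atual)  # Adiciona o último bloco de horários vagos, se existir
--
--         # Encontra o maior bloco de horários vagos
--         for espaco in espacos:
--             if len(espaco) > len(maior_espaco):
--                 maior_espaco = espaco
--                 dia_escolhido = dia
--
--     return maior_espaco, dia_escolhido
-- ===== SOURCE B (Python) =====
-- def verificar_maior_espaco(grade: list, horarios_possiveis: list) -> list:
--     # Run-length DP: keep only integers (current run length, best length/end/day);
--     # the winning block itself is reconstructed once at the end by slicing.
--     best_len = 0
--     best_end = 0
--     best_dia = 0
--     for dia in range(5):
--         run = 0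
--         for i, horario in enumerate(horarios_possiveis):
--             if grade[horario][dia] is None:
--                 run += 1
--                 if run > best_len:
--                     best_len = run
--                     best_end = i
--                     best_dia = dia
--             else:
--                 run = 0
--     return horarios_possiveis[best_end - best_len + 1 : best_end + 1], best_dia
-- ===== Notes on version B (the rewrite author's own statement) =====
-- stated objective: alternative
-- what changed: B replaces A's per-day run-collection over lists by a run-length DP that carries only four integers (current run length, best length, best end index, best day) and reconstructs the winning block with a single slice of horarios_possiveis at the end; no intermediate list of runs or candidate blocks is ever built.
import Mathlib
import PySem

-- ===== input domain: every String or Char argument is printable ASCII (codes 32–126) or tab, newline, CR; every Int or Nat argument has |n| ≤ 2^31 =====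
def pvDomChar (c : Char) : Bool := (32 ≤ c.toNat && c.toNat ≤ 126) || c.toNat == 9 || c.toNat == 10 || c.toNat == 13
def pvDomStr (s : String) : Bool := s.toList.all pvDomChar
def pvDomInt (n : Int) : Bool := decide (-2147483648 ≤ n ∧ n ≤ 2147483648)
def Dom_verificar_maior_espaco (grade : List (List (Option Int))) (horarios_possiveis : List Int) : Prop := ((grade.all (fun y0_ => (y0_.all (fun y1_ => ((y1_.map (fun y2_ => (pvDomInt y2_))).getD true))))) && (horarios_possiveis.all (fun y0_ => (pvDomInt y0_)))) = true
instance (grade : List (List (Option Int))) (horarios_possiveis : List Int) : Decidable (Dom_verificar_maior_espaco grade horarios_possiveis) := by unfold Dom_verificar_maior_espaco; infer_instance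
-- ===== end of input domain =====

-- B replaces per-day run-collection over lists by an integer run-length DP plus one final slice; objective: alternative.


-- ===== PORT A =====
-- 'grade[horario][dia] is None' (the same expression occurs literally in both Pythons)
def pvCellIsNone (grade : List (List (Option Int))) (horario dia : Int) : Bool :=
  match (PySem.List.pyGet? grade horario).bind (fun row => PySem.List.pyGet? row dia) with
  | some none => true
  | _ => false

-- inner loop of A: builds (espaco_atual, espacos)
def pvRunsStep (grade : List (List (Option Int))) (dia : Int)
    (st : List Int × List (List Int)) (horario : Int) : List Int × List (List Int) :=
  if pvCellIsNone grade horario dia then (st.1 ++ [horario], st.2)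
  else if st.1 ≠ [] then ([], st.2 ++ [st.1]) else ([], st.2)

-- 'if len(espaco) > len(maior_espaco): maior_espaco = espaco; dia_escolhido = dia'
def pvCmp (dia : Int) (best : List Int × Int) (espaco : List Int) : List Int × Int :=
  if espaco.length > best.1.length then (espaco, dia) else best

def pvDayA (grade : List (List (Option Int))) (horarios_possiveis : List Int)
    (dia : Int) (best : List Int × Int) : List Int × Int :=
  let p := horarios_possiveis.foldl (pvRunsStep grade dia) ([], [])
  let espacos := if p.1 ≠ [] then p.2 ++ [p.1] else p.2
  espacos.foldl (pvCmp dia) best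

def verificar_maior_espaco (grade : List (List (Option Int))) (horarios_possiveis : List Int) : List Int × Int :=
  (PySem.List.pyRange 0 5 1).foldl (fun best dia => pvDayA grade horarios_possiveis dia best) ([], 0)

-- ===== PORT B =====
-- inner loop of B over enumerate(horarios_possiveis); state (run, (best_len, best_end, best_dia))
def pvDPStep (grade : List (List (Option Int))) (dia : Int)
    (st : Int × Int × Int × Int) (p : Int × Int) : Int × Int × Int × Int :=
  if pvCellIsNone grade p.2 dia then
    let run := st.1 + 1
    if run > st.2.1 then (run, run, p.1, dia) else (run, st.2)
  else (0, st.2)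

def verificar_maior_espaco_alt (grade : List (List (Option Int))) (horarios_possiveis : List Int) : List Int × Int :=
  let b := (PySem.List.pyRange 0 5 1).foldl
    (fun best dia => ((PySem.List.enumerate horarios_possiveis 0).foldl (pvDPStep grade dia) (0, best)).2)
    (0, 0, 0)
  (PySem.List.slice horarios_possiveis (some (b.2.1 - b.1 + 1)) (some (b.2.1 + 1)), b.2.2)

-- ===== PRECONDITION & SPEC =====
-- Pre_ excludes exactly the inputs where A raises IndexError: some horario does not index grade
-- (Python negative wraparound included), or the selected row is shorter than 5.
def Pre_verificar_maior_espaco (grade : List (List (Option Int))) (horarios_possiveis : List Int) : Prop :=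
  ∀ h ∈ horarios_possiveis, ∃ row, PySem.List.pyGet? grade h = some row ∧ 5 ≤ row.length
instance (grade : List (List (Option Int))) (horarios_possiveis : List Int) : Decidable (Pre_verificar_maior_espaco grade horarios_possiveis) := by unfold Pre_verificar_maior_espaco; infer_instance
def pvWitness_verificar_maior_espaco : List (List (Option Int)) × List Int :=
  ([[none, some 1, none, none, none]], [0])

def Spec_verificar_maior_espaco (grade : List (List (Option Int))) (horarios_possiveis : List Int) (out : List Int × Int) : Prop := out = verificar_maior_espaco_alt grade horarios_possiveis
instance (grade : List (List (Option Int))) (horarios_possiveis : List Int) (out : List Int × Int) : Decidable (Spec_verificar_maior_espaco grade horarios_possiveis out) := by unfold Spec_verificar_maior_espaco; infer_instance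

-- ===== CLAIM (what is proved, stated in full; the proofs are below) =====
def Claim_equal_verificar_maior_espaco : Prop := ∀ (grade : List (List (Option Int))) (horarios_possiveis : List Int), Dom_verificar_maior_espaco grade horarios_possiveis → Pre_verificar_maior_espaco grade horarios_possiveis → Spec_verificar_maior_espaco grade horarios_possiveis (verificar_maior_espaco grade horarios_possiveis)

-- ===== LEMMAS AND PROOFS =====

-- Intermediate 1 (proof-only): STREAM — like A but comparing each run against the best at run end.
def pvStreamStep (grade : List (List (Option Int))) (dia : Int)
    (st : List Int × (List Int × Int)) (horario : Int) : List Int × (List Int × Int) :=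
  if pvCellIsNone grade horario dia then (st.1 ++ [horario], st.2)
  else ([], pvCmp dia st.2 st.1)

def pvDayStream (grade : List (List (Option Int))) (horarios_possiveis : List Int)
    (dia : Int) (best : List Int × Int) : List Int × Int :=
  let q := horarios_possiveis.foldl (pvStreamStep grade dia) ([], best)
  pvCmp dia q.2 q.1

-- Intermediate 2 (proof-only): STREAM' — the best is updated inline while the run grows (list form of the DP).
def pvStreamStep' (grade : List (List (Option Int))) (dia : Int)
    (st : List Int × (List Int × Int)) (horario : Int) : List Int × (List Int × Int) :=
  if pvCellIsNone grade horario dia then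
    ((st.1 ++ [horario]),
      if (st.1 ++ [horario]).length > st.2.1.length then (st.1 ++ [horario], dia) else st.2)
  else ([], st.2)

def pvDayS' (grade : List (List (Option Int))) (hs : List Int) (dia : Int)
    (best : List Int × Int) : List Int × Int :=
  (hs.foldl (pvStreamStep' grade dia) ([], best)).2

def pvDayD (grade : List (List (Option Int))) (hs : List Int) (dia : Int)
    (b : Int × Int × Int) : Int × Int × Int :=
  ((PySem.List.enumerate hs 0).foldl (pvDPStep grade dia) (0, b)).2

-- A's collect-then-scan equals STREAM (day level, any pending run / collected runs).
theorem pvDay_inv (grade : List (List (Option Int))) (dia : Int) :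
    ∀ (hs : List Int) (cur : List Int) (esps : List (List Int)) (best : List Int × Int),
      (let p := hs.foldl (pvRunsStep grade dia) (cur, esps)
       (if p.1 ≠ [] then p.2 ++ [p.1] else p.2).foldl (pvCmp dia) best)
      =
      (let q := hs.foldl (pvStreamStep grade dia) (cur, esps.foldl (pvCmp dia) best)
       pvCmp dia q.2 q.1) := by
  intro hs
  induction hs with
  | nil =>
    intro cur esps best
    by_cases hcur : cur = []
    · subst hcur; simp [pvCmp]
    · simp [hcur, List.foldl_append]
  | cons h hs ih =>
    intro cur esps best
    by_cases hc : pvCellIsNone grade h dia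
    · simpa [List.foldl_cons, pvRunsStep, pvStreamStep, hc] using ih (cur ++ [h]) esps best
    · by_cases hcur : cur = []
      · subst hcur
        simpa [List.foldl_cons, pvRunsStep, pvStreamStep, hc, pvCmp] using ih [] esps best
      · have := ih [] (esps ++ [cur]) best
        simpa [List.foldl_cons, pvRunsStep, pvStreamStep, hc, hcur,
               List.foldl_append, pvCmp] using this

theorem pvDayA_eq_stream (grade : List (List (Option Int))) (hs : List Int) (dia : Int)
    (best : List Int × Int) : pvDayA grade hs dia best = pvDayStream grade hs dia best := by
  have := pvDay_inv grade dia hs [] [] best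
  simpa [pvDayA, pvDayStream] using this

-- pvCmp absorbs run extension: comparing after the run grew equals the inline update.
theorem pvCmp_ext (dia : Int) (best : List Int × Int) (cur : List Int) (h : Int) :
    (if (cur ++ [h]).length > (pvCmp dia best cur).1.length then (cur ++ [h], dia)
     else pvCmp dia best cur) = pvCmp dia best (cur ++ [h]) := by
  simp only [pvCmp, List.length_append, List.length_cons, List.length_nil]
  split_ifs <;> simp_all; omega

-- STREAM = STREAM' (the inline best is always pvCmp of the deferred best with the pending run).
theorem pvStream_eq_stream' (grade : List (List (Option Int))) (dia : Int) :
    ∀ (hs cur : List Int) (best : List Int × Int),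
      (let q := hs.foldl (pvStreamStep grade dia) (cur, best)
       pvCmp dia q.2 q.1)
      = (hs.foldl (pvStreamStep' grade dia) (cur, pvCmp dia best cur)).2 := by
  intro hs
  induction hs with
  | nil => intro cur best; rfl
  | cons h hs ih =>
    intro cur best
    by_cases hc : pvCellIsNone grade h dia
    · have := ih (cur ++ [h]) best
      simp only [List.foldl_cons, pvStreamStep, pvStreamStep', hc, if_true] at this ⊢
      rw [this, pvCmp_ext]
    · have := ih [] (pvCmp dia best cur)
      simp only [List.foldl_cons, pvStreamStep, pvStreamStep', hc] at this ⊢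
      simpa [pvCmp] using this

theorem pvDayStream_eq (grade : List (List (Option Int))) (hs : List Int) (dia : Int)
    (best : List Int × Int) : pvDayStream grade hs dia best = pvDayS' grade hs dia best := by
  have := pvStream_eq_stream' grade dia hs [] best
  simpa [pvDayStream, pvDayS', pvCmp] using this

-- segment hs[a:b] as drop/take (the shape PySem.List.slice_natCast produces)
def pvSeg (hs : List Int) (a b : Nat) : List Int := (hs.drop a).take (b - a)

-- relation between STREAM' best (L, d) and DP best (best_len, best_end, best_dia)
def pvRel (hs : List Int) (L : List Int) (d : Int) (b : Int × Int × Int) : Prop :=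
  b.1 = (L.length : Int) ∧ b.2.2 = d ∧
  ∃ bE : Nat, b.2.1 = (bE : Int) ∧ L.length ≤ bE + 1 ∧ L = pvSeg hs (bE + 1 - L.length) (bE + 1)

theorem pvSeg_snoc (hs : List Int) (a j : Nat) (ha : a ≤ j) (hj : j < hs.length) :
    pvSeg hs a (j + 1) = pvSeg hs a j ++ [hs[j]] := by
  unfold pvSeg
  have h1 : j + 1 - a = (j - a) + 1 := by omega
  rw [h1, List.take_add_one]
  have h2 : (hs.drop a)[j - a]? = some hs[j] := by
    rw [List.getElem?_drop]
    have h3 : a + (j - a) = j := by omega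
    rw [h3, List.getElem?_eq_getElem hj]
  simp [h2]

-- inner simulation: STREAM' over hs.drop j  vs  the DP over enumerate (hs.drop j) j
theorem pvInner (grade : List (List (Option Int))) (hs : List Int) (dia : Int) :
    ∀ (rest : List Int) (j : Nat) (cur L : List Int) (d : Int) (b : Int × Int × Int),
      rest = hs.drop j → cur.length ≤ j → cur = pvSeg hs (j - cur.length) j →
      pvRel hs L d b →
      pvRel hs (rest.foldl (pvStreamStep' grade dia) (cur, (L, d))).2.1
               (rest.foldl (pvStreamStep' grade dia) (cur, (L, d))).2.2
               ((PySem.List.enumerate rest (j : Int)).foldl (pvDPStep grade dia)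
                 ((cur.length : Int), b)).2 := by
  intro rest
  induction rest with
  | nil =>
    intro j cur L d b _ _ _ hrel
    exact hrel
  | cons h rest ih =>
    intro j cur L d b hrest hlen hcur hrel
    have hj : j < hs.length := by
      by_contra hge
      rw [List.drop_eq_nil_of_le (by omega)] at hrest
      simp at hrest
    rw [List.drop_eq_getElem_cons hj] at hrest
    have hh : h = hs[j] := (List.cons.injEq _ _ _ _ ▸ hrest).1
    have hrest' : rest = hs.drop (j + 1) := (List.cons.injEq _ _ _ _ ▸ hrest).2
    have hlen' : (cur ++ [h]).length = cur.length + 1 := by simp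
    obtain ⟨hb1, hb3, bE, hbE, hbLen, hbSeg⟩ := hrel
    simp only [PySem.List.enumerate_cons, List.foldl_cons]
    by_cases hc : pvCellIsNone grade h dia
    · have hcur' : cur ++ [h] = pvSeg hs ((j + 1) - (cur ++ [h]).length) (j + 1) := by
        have he : (j + 1) - (cur ++ [h]).length = j - cur.length := by rw [hlen']; omega
        rw [he, pvSeg_snoc hs (j - cur.length) j (by omega) hj, ← hcur, hh]
      by_cases hgt : cur.length + 1 > L.length
      · -- best updated to the grown run
        have hsstep : pvStreamStep' grade dia (cur, (L, d)) h
            = (cur ++ [h], (cur ++ [h], dia)) := by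
          simp only [pvStreamStep', hc, if_true]
          rw [if_pos (by rw [hlen']; exact hgt)]
        have hdstep : pvDPStep grade dia ((cur.length : Int), b) ((j : Int), h)
            = ((cur.length : Int) + 1, ((cur.length : Int) + 1, (j : Int), dia)) := by
          simp only [pvDPStep, hc, if_true]
          rw [if_pos (by rw [hb1]; exact_mod_cast hgt)]
        rw [hsstep, hdstep]
        have hrel' : pvRel hs (cur ++ [h]) dia
            (((cur.length : Int) + 1, (j : Int), dia) : Int × Int × Int) := by
          refine ⟨by rw [hlen']; push_cast; ring, rfl, j, rfl, by rw [hlen']; omega, ?_⟩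
          simpa [hlen'] using hcur'
        have H := ih (j + 1) (cur ++ [h]) (cur ++ [h]) dia
          (((cur.length : Int) + 1, (j : Int), dia)) hrest' (by rw [hlen']; omega) hcur' hrel'
        have hc1 : ((cur ++ [h]).length : Int) = (cur.length : Int) + 1 := by
          rw [hlen']; push_cast; ring
        have hc2 : ((j : Int) + 1) = ((j + 1 : Nat) : Int) := by push_cast; ring
        rw [hc1] at H
        rw [hc2]
        exact H
      · -- best unchanged
        have hsstep : pvStreamStep' grade dia (cur, (L, d)) h = (cur ++ [h], (L, d)) := by
          simp only [pvStreamStep', hc, if_true]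
          rw [if_neg (by rw [hlen']; exact hgt)]
        have hdstep : pvDPStep grade dia ((cur.length : Int), b) ((j : Int), h)
            = ((cur.length : Int) + 1, b) := by
          simp only [pvDPStep, hc, if_true]
          rw [if_neg (by rw [hb1]; exact_mod_cast hgt)]
        rw [hsstep, hdstep]
        have H := ih (j + 1) (cur ++ [h]) L d b hrest' (by rw [hlen']; omega) hcur'
          ⟨hb1, hb3, bE, hbE, hbLen, hbSeg⟩
        have hc1 : ((cur ++ [h]).length : Int) = (cur.length : Int) + 1 := by
          rw [hlen']; push_cast; ring
        have hc2 : ((j : Int) + 1) = ((j + 1 : Nat) : Int) := by push_cast; ring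
        rw [hc1] at H
        rw [hc2]
        exact H
    · -- cell filled: run resets
      have hsstep : pvStreamStep' grade dia (cur, (L, d)) h = ([], (L, d)) := by
        simp [pvStreamStep', hc]
      have hdstep : pvDPStep grade dia ((cur.length : Int), b) ((j : Int), h) = (0, b) := by
        simp [pvDPStep, hc]
      rw [hsstep, hdstep]
      have H := ih (j + 1) [] L d b hrest' (by simp) (by simp [pvSeg])
        ⟨hb1, hb3, bE, hbE, hbLen, hbSeg⟩
      have hc2 : ((j : Int) + 1) = ((j + 1 : Nat) : Int) := by push_cast; ring
      rw [hc2]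
      simpa using H

theorem pvDay_rel (grade : List (List (Option Int))) (hs : List Int) (dia : Int)
    (best : List Int × Int) (b : Int × Int × Int) (h : pvRel hs best.1 best.2 b) :
    pvRel hs (pvDayS' grade hs dia best).1 (pvDayS' grade hs dia best).2
      (pvDayD grade hs dia b) := by
  have H := pvInner grade hs dia hs 0 [] best.1 best.2 b (by simp) (by simp) (by simp [pvSeg]) h
  simpa [pvDayS', pvDayD] using H

theorem pvRel_extract (hs L : List Int) (d : Int) (b : Int × Int × Int)
    (h : pvRel hs L d b) :
    (PySem.List.slice hs (some (b.2.1 - b.1 + 1)) (some (b.2.1 + 1)), b.2.2) = (L, d) := by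
  obtain ⟨h1, h2, bE, h3, h4, h5⟩ := h
  have ha : b.2.1 - b.1 + 1 = ((bE + 1 - L.length : Nat) : Int) := by
    rw [h1, h3, Nat.cast_sub h4]; push_cast; ring
  have hb : b.2.1 + 1 = ((bE + 1 : Nat) : Int) := by rw [h3]; push_cast; ring
  rw [ha, hb, PySem.List.slice_natCast, h2]
  have hx : bE + 1 - (bE + 1 - L.length) = L.length := by omega
  refine Prod.ext ?_ rfl
  conv_rhs => rw [h5]
  unfold pvSeg
  rw [hx]

-- ===== VERDICT (by name: the statement is the Claim_ definition above) =====
theorem verificar_maior_espaco_spec : Claim_equal_verificar_maior_espaco := by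
  intro grade hs _ _
  unfold Spec_verificar_maior_espaco verificar_maior_espaco verificar_maior_espaco_alt
  have hdays : PySem.List.pyRange 0 5 1 = [0, 1, 2, 3, 4] := by decide
  have hD : ∀ (dia : Int) (b : Int × Int × Int),
      ((PySem.List.enumerate hs 0).foldl (pvDPStep grade dia) (0, b)).2
        = pvDayD grade hs dia b := fun _ _ => rfl
  simp only [hdays, List.foldl_cons, List.foldl_nil, pvDayA_eq_stream, pvDayStream_eq, hD]
  have h0 : pvRel hs [] 0 (0, 0, 0) := ⟨rfl, rfl, 0, rfl, by simp, by simp [pvSeg]⟩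
  have h1 := pvDay_rel grade hs 0 ([], 0) _ h0
  have h2 := pvDay_rel grade hs 1 _ _ h1
  have h3 := pvDay_rel grade hs 2 _ _ h2
  have h4 := pvDay_rel grade hs 3 _ _ h3
  have h5 := pvDay_rel grade hs 4 _ _ h4
  exact (pvRel_extract hs _ _ _ h5).symm
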